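-- pv_equiv track=rewrite | github.com/doocs/leetcode | solution/1300-1399/1370.Increasing Decreasing String/Solution.py | sortString
-- ===== SOURCE A (Python) =====
-- def sortString(s: str) -> str:
--     counter = [0] * 26
--     for c in s:
--         counter[ord(c) - ord('a')] += 1
--     ans = []
--     while len(ans) < len(s):
--         for i in range(26):
--             if counter[i]:
--                 ans.append(chr(i + ord('a')))
--                 counter[i] -= 1
--         for i in range(25, -1, -1):
--             if counter[i]:
--                 ans.append(chr(i + ord('a')))
--                 counter[i] -= 1
--     return ''.join(ans)
-- ===== SOURCE B (Python) =====
-- def sortString(s: str) -> str: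
--     cnt = [0] * 26
--     for c in s:
--         cnt[ord(c) - ord('a')] += 1
--     res = []
--     for m in range(1, max(cnt) + 1):
--         level = [chr(i + ord('a')) for i in range(26) if cnt[i] >= m]
--         res.extend(level if m % 2 == 1 else reversed(level))
--     return ''.join(res)
-- ===== Notes on version B (the rewrite author's own statement) =====
-- stated objective: alternative
-- what changed: B replaces A's while-loop that repeatedly scans and destructively decrements the 26-bucket count array until the output is full by a single pass over levels m=1..max(count), emitting the ascending selection of characters with count>=m for odd m and its reversal for even m.
import Mathlib
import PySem

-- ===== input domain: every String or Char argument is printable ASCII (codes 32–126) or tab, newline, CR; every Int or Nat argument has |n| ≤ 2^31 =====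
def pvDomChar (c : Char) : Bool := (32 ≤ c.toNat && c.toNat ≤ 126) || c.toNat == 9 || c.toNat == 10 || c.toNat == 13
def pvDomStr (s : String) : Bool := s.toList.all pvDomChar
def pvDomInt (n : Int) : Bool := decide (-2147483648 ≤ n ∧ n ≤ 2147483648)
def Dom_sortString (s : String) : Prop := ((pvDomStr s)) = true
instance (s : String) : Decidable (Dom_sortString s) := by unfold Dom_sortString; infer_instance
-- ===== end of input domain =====

-- B emits the answer level by level from one precomputed count array instead of A's
-- destructive rescan-and-decrement while-loop; objective: alternative (no speed claim).

-- ===== PORT A =====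
-- cnt[i] for a Nat index i (0 if out of range; every use is in range)
def pvG (c : List Int) (i : Nat) : Int := c.getD i 0

-- counter[ord(c) - ord('a')] += 1   (Python list indexing: negative index from the end; out of range = IndexError = none)
def pvCountStep (cnt : List Int) (ch : Char) : Option (List Int) :=
  match PySem.List.pyGet? cnt ((ch.toNat : Int) - 97) with
  | none => none
  | some v => PySem.List.pySet? cnt ((ch.toNat : Int) - 97) (v + 1)

-- counter = [0]*26; for c in s: counter[ord(c)-ord('a')] += 1
def pvCount (s : String) : Option (List Int) :=
  s.toList.foldlM pvCountStep (List.replicate 26 0)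

-- body of 'if counter[i]: ans.append(chr(i + ord('a'))); counter[i] -= 1'  (i always in range 0..25)
def pvPassStep (st : List Char × List Int) (i : Nat) : List Char × List Int :=
  if pvG st.2 i ≠ 0 then (st.1 ++ [Char.ofNat (i + 97)], st.2.set i (pvG st.2 i - 1)) else st

-- one iteration of the while body: 'for i in range(26): …' then 'for i in range(25,-1,-1): …'
def pvRound (st : List Char × List Int) : List Char × List Int :=
  (List.range 26).reverse.foldl pvPassStep ((List.range 26).foldl pvPassStep st)

-- while len(ans) < len(s): …   (fuel = len(s) iterations always suffice: each round appends ≥ 1 char)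
def pvWhile : Nat → List Char × List Int → Nat → List Char
  | 0, st, _ => st.1
  | f+1, st, n => if st.1.length < n then pvWhile f (pvRound st) n else st.1

def sortString (s : String) : String :=
  match pvCount s with
  | none => ""   -- unreachable under Pre_sortString (Python raises IndexError here)
  | some c => String.mk (pvWhile s.length ([], c) s.length)

-- ===== PORT B =====
-- level = [chr(i + ord('a')) for i in range(26) if cnt[i] >= m]
def pvLevel (c : List Int) (m : Int) : List Char :=
  (List.range 26).filterMap (fun i => if m ≤ pvG c i then some (Char.ofNat (i + 97)) else none)

-- for m in range(1, max(cnt)+1): res.extend(level if m % 2 == 1 else reversed(level))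
def pvLevels (c : List Int) : List Char :=
  (PySem.List.pyRange 1 ((PySem.List.max? c (fun x => x)).getD 0 + 1) 1).foldl
    (fun res m => res ++ (if m % 2 == 1 then pvLevel c m else (pvLevel c m).reverse)) []

-- B's counting lines are literally A's counting lines, so the helper pvCount is shared.
def sortString_alt (s : String) : String :=
  match pvCount s with
  | none => ""   -- unreachable under Pre_sortString (Python raises IndexError here)
  | some c => String.mk (pvLevels c)

-- ===== PRECONDITION & SPEC =====
-- Pre_ excludes exactly the inputs on which the Python A raises IndexError: a character whose
-- code is outside [71,122] makes 'counter[ord(c)-97]' an out-of-range index of the 26-list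
-- (codes 71..96 give a valid negative index, so A returns there and B matches it).
def Pre_sortString (s : String) : Prop := ∀ c ∈ s.toList, 71 ≤ c.toNat ∧ c.toNat ≤ 122
instance (s : String) : Decidable (Pre_sortString s) := by unfold Pre_sortString; exact List.decidableBAll _ _

def pvWitness_sortString : String := "ab"

def Spec_sortString (s : String) (out : String) : Prop := out = sortString_alt s
instance (s : String) (out : String) : Decidable (Spec_sortString s out) := by unfold Spec_sortString; infer_instance

-- ===== CLAIM (what is proved, stated in full; the proofs are below) =====
def Claim_equal_sortString : Prop := ∀ (s : String), Dom_sortString s → Pre_sortString s → Spec_sortString s (sortString s)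

-- ===== LEMMAS AND PROOFS =====

-- the sum of the first k counters (all relevant counters live at indices < 26)
def pvSk (k : Nat) (c : List Int) : Nat := ((List.range k).map (fun i => (pvG c i).toNat)).sum

-- the counter after one full round: each bucket loses up to 2
def pvM (c : List Int) : List Int := c.map (fun x => max (x - 2) 0)

-- the decrement part of a pass, isolated
def pvDecs (l : List Nat) (c : List Int) : List Int :=
  l.foldl (fun c i => if pvG c i ≠ 0 then c.set i (pvG c i - 1) else c) c

theorem pvG_set_ne (c : List Int) (i j : Nat) (v : Int) (h : i ≠ j) :
    pvG (c.set i v) j = pvG c j := by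
  simp [pvG, List.getD, List.getElem?_set_ne h]

theorem pvG_set_self (c : List Int) (i : Nat) (v : Int) (h : i < c.length) :
    pvG (c.set i v) i = v := by
  simp [pvG, List.getD, List.getElem?_set_self h]

theorem pvG_oob (c : List Int) (i : Nat) (h : c.length ≤ i) : pvG c i = 0 := by
  simp [pvG, List.getD, List.getElem?_eq_none h]

theorem pvG_pos_lt (c : List Int) (i : Nat) (h : pvG c i ≠ 0) : i < c.length := by
  by_contra hge
  exact h (pvG_oob c i (by omega))

theorem pvG_nonneg (c : List Int) (h : ∀ x ∈ c, 0 ≤ x) (j : Nat) : 0 ≤ pvG c j := by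
  by_cases hj : j < c.length
  · simpa [pvG, List.getD, List.getElem?_eq_getElem hj] using h _ (List.getElem_mem hj)
  · simp [pvG_oob c j (by omega)]

theorem pvG_mem (c : List Int) (j : Nat) (h : j < c.length) : pvG c j ∈ c := by
  simpa [pvG, List.getD, List.getElem?_eq_getElem h] using List.getElem_mem h

theorem pvM_pvG (c : List Int) (j : Nat) : pvG (pvM c) j = max (pvG c j - 2) 0 := by
  by_cases hj : j < c.length
  · simp [pvM, pvG, List.getD, List.getElem?_map, List.getElem?_eq_getElem hj]
  · rw [pvG_oob c j (by omega), pvG_oob _ j (by simpa [pvM] using (by omega : c.length ≤ j))]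
    simp

theorem pv_pass_eq : ∀ (l : List Nat), l.Nodup → ∀ (ans : List Char) (c : List Int),
    l.foldl pvPassStep (ans, c)
      = (ans ++ l.filterMap (fun i => if pvG c i ≠ 0 then some (Char.ofNat (i + 97)) else none),
         pvDecs l c) := by
  intro l
  induction l with
  | nil => intro _ ans c; simp [pvDecs]
  | cons i l ih =>
    intro hl ans c
    rw [List.nodup_cons] at hl
    have hcongr : ∀ (v : Int),
        l.filterMap (fun j => if pvG (c.set i v) j ≠ 0 then some (Char.ofNat (j + 97)) else none)
          = l.filterMap (fun j => if pvG c j ≠ 0 then some (Char.ofNat (j + 97)) else none) := by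
      intro v
      apply List.filterMap_congr
      intro j hj
      rw [pvG_set_ne c i j v (fun hij => hl.1 (hij ▸ hj))]
    by_cases h : pvG c i = 0
    · rw [List.foldl_cons]
      have hstep : pvPassStep (ans, c) i = (ans, c) := by simp [pvPassStep, h]
      rw [hstep, ih hl.2]
      simp [pvDecs, h, List.filterMap_cons]
    · rw [List.foldl_cons]
      have hstep : pvPassStep (ans, c) i
          = (ans ++ [Char.ofNat (i + 97)], c.set i (pvG c i - 1)) := by
        simp [pvPassStep, h]
      rw [hstep, ih hl.2, hcongr]
      simp [pvDecs, h, List.filterMap_cons, List.append_assoc]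

theorem pv_decs_getD : ∀ (l : List Nat), l.Nodup → ∀ (c : List Int) (j : Nat),
    (pvDecs l c).length = c.length ∧
    pvG (pvDecs l c) j = if j ∈ l ∧ pvG c j ≠ 0 then pvG c j - 1 else pvG c j := by
  intro l
  induction l with
  | nil => intro _ c j; simp [pvDecs]
  | cons i l ih =>
    intro hl c j
    rw [List.nodup_cons] at hl
    by_cases h : pvG c i = 0
    · have e : pvDecs (i :: l) c = pvDecs l c := by simp [pvDecs, h]
      rw [e]
      obtain ⟨h1, h2⟩ := ih hl.2 c j
      refine ⟨h1, ?_⟩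
      rw [h2]
      by_cases hj : j = i
      · subst hj; simp [h]
      · simp [List.mem_cons, hj]
    · have hlt : i < c.length := pvG_pos_lt c i h
      have e : pvDecs (i :: l) c = pvDecs l (c.set i (pvG c i - 1)) := by simp [pvDecs, h]
      rw [e]
      obtain ⟨h1, h2⟩ := ih hl.2 (c.set i (pvG c i - 1)) j
      refine ⟨by rw [h1]; simp, ?_⟩
      rw [h2]
      by_cases hj : j = i
      · subst hj
        rw [pvG_set_self c j _ hlt]
        simp [hl.1, h]
      · rw [pvG_set_ne c i j _ (fun hij => hj hij.symm)]
        simp [List.mem_cons, hj]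

theorem pv_round_eq (ans : List Char) (c : List Int) (h26 : c.length = 26) (hn : ∀ x ∈ c, 0 ≤ x) :
    pvRound (ans, c) = (ans ++ pvLevel c 1 ++ (pvLevel c 2).reverse, pvM c) := by
  have hnr : (List.range 26).Nodup := List.nodup_range
  have hnrr : ((List.range 26).reverse).Nodup := by simpa using hnr
  unfold pvRound
  rw [pv_pass_eq _ hnr ans c, pv_pass_eq _ hnrr _ _]
  have hc1 : ∀ j, pvG (pvDecs (List.range 26) c) j
      = if j ∈ List.range 26 ∧ pvG c j ≠ 0 then pvG c j - 1 else pvG c j :=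
    fun j => (pv_decs_getD _ hnr c j).2
  have hc1len : (pvDecs (List.range 26) c).length = c.length := (pv_decs_getD _ hnr c 0).1
  have e1 : (List.range 26).filterMap
      (fun i => if pvG c i ≠ 0 then some (Char.ofNat (i + 97)) else none) = pvLevel c 1 := by
    unfold pvLevel
    apply List.filterMap_congr
    intro i _
    have := pvG_nonneg c hn i
    by_cases h : pvG c i = 0
    · simp [h]
    · rw [if_pos h, if_pos (by omega)]
  have e2 : (List.range 26).filterMap
      (fun i => if pvG (pvDecs (List.range 26) c) i ≠ 0 then some (Char.ofNat (i + 97)) else none)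
        = pvLevel c 2 := by
    unfold pvLevel
    apply List.filterMap_congr
    intro i hi
    rw [List.mem_range] at hi
    have hnn := pvG_nonneg c hn i
    have hiff : (pvG (pvDecs (List.range 26) c) i ≠ 0) ↔ (2 ≤ pvG c i) := by
      rw [hc1 i]
      by_cases h : pvG c i = 0 <;> simp [h, List.mem_range, hi] <;> omega
    exact if_congr hiff rfl rfl
  have e3 : pvDecs ((List.range 26).reverse) (pvDecs (List.range 26) c) = pvM c := by
    have hl2 := fun j => (pv_decs_getD _ hnrr (pvDecs (List.range 26) c) j).2
    have hlen : (pvDecs ((List.range 26).reverse) (pvDecs (List.range 26) c)).length = c.length := by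
      rw [(pv_decs_getD _ hnrr _ 0).1, hc1len]
    apply List.ext_getElem (by rw [hlen]; simp [pvM])
    intro j hja hjb
    have hj26 : j < 26 := by rw [hlen, h26] at hja; exact hja
    rw [← List.getD_eq_getElem _ 0 hja, ← List.getD_eq_getElem _ 0 hjb]
    show pvG _ j = pvG (pvM c) j
    rw [pvM_pvG, hl2 j, hc1 j]
    have hnn := pvG_nonneg c hn j
    simp only [List.mem_reverse, List.mem_range, hj26, true_and]
    split_ifs <;> omega
  rw [List.filterMap_reverse] at *
  simp only [Prod.mk.injEq]
  constructor
  · rw [e1, e2, List.append_assoc]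
  · exact e3

theorem pvSk_succ (k : Nat) (c : List Int) : pvSk (k+1) c = pvSk k c + (pvG c k).toNat := by
  simp [pvSk, List.range_succ]

theorem pvSk_bound (c : List Int) : ∀ k j, j < k → (pvG c j).toNat ≤ pvSk k c := by
  intro k
  induction k with
  | zero => omega
  | succ k ih =>
    intro j hj
    rw [pvSk_succ]
    by_cases h : j = k
    · subst h; omega
    · have := ih j (by omega); omega

theorem pvSk_set (c : List Int) (v : Int) : ∀ k j, j < k → j < c.length →
    pvSk k (c.set j v) + (pvG c j).toNat = pvSk k c + v.toNat := by
  intro k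
  induction k with
  | zero => omega
  | succ k ih =>
    intro j hj hjc
    rw [pvSk_succ, pvSk_succ]
    by_cases h : j = k
    · subst h
      rw [pvG_set_self c j v hjc]
      have : pvSk j (c.set j v) = pvSk j c := by
        unfold pvSk
        congr 1
        apply List.map_congr_left
        intro i hi
        rw [List.mem_range] at hi
        rw [pvG_set_ne c j i v (by omega)]
      omega
    · rw [pvG_set_ne c j k v h]
      have := ih j (by omega) hjc
      omega

theorem pvSk_ex_pos (c : List Int) : ∀ k, pvSk k c ≠ 0 → ∃ j, j < k ∧ pvG c j ≠ 0 := by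
  intro k
  induction k with
  | zero => intro h; exact absurd rfl h
  | succ k ih =>
    intro h
    by_cases hk : pvG c k = 0
    · have : pvSk k c ≠ 0 := by rw [pvSk_succ, hk] at h; simpa using h
      obtain ⟨j, hj, hp⟩ := ih this
      exact ⟨j, by omega, hp⟩
    · exact ⟨k, by omega, hk⟩

theorem pvSk_split (c : List Int) (hn : ∀ x ∈ c, 0 ≤ x) : ∀ k,
    pvSk k c
      = ((List.range k).filterMap (fun i => if (1:Int) ≤ pvG c i then some (Char.ofNat (i + 97)) else none)).length
        + ((List.range k).filterMap (fun i => if (2:Int) ≤ pvG c i then some (Char.ofNat (i + 97)) else none)).length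
        + pvSk k (pvM c) := by
  intro k
  induction k with
  | zero => simp [pvSk]
  | succ k ih =>
    rw [pvSk_succ, pvSk_succ, List.range_succ, List.filterMap_append, List.filterMap_append,
      List.length_append, List.length_append, pvM_pvG]
    have hnn := pvG_nonneg c hn k
    by_cases h1 : (1:Int) ≤ pvG c k
    · by_cases h2 : (2:Int) ≤ pvG c k
      · simp only [List.filterMap_cons, if_pos h1, if_pos h2, List.filterMap_nil]
        simp only [List.length_cons, List.length_nil]
        omega
      · simp only [List.filterMap_cons, if_pos h1, if_neg h2, List.filterMap_nil]
        simp only [List.length_cons, List.length_nil]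
        omega
    · simp only [List.filterMap_cons, if_neg h1, if_neg (by omega : ¬ (2:Int) ≤ pvG c k),
        List.filterMap_nil, List.length_nil]
      omega

theorem pv_countStep (cnt : List Int) (ch : Char) (h26 : cnt.length = 26)
    (hch : 71 ≤ ch.toNat ∧ ch.toNat ≤ 122) :
    ∃ j, j < 26 ∧ pvCountStep cnt ch = some (cnt.set j (pvG cnt j + 1)) := by
  by_cases h97 : 97 ≤ ch.toNat
  · refine ⟨ch.toNat - 97, by omega, ?_⟩
    have hj : ch.toNat - 97 < cnt.length := by omega
    have hidx : PySem.List.pyIdx? cnt.length ((ch.toNat : Int) - 97) = some (ch.toNat - 97) := by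
      unfold PySem.List.pyIdx?
      rw [if_pos (by omega : (0:Int) ≤ (ch.toNat : Int) - 97),
          if_pos (by rw [h26]; push_cast; omega)]
      congr 1
      omega
    have hget : PySem.List.pyGet? cnt ((ch.toNat : Int) - 97)
        = some (pvG cnt (ch.toNat - 97)) := by
      unfold PySem.List.pyGet?
      rw [hidx, Option.bind_some, List.getElem?_eq_getElem hj]
      congr 1
      exact (List.getD_eq_getElem cnt 0 hj).symm
    unfold pvCountStep
    rw [hget]
    unfold PySem.List.pySet?
    rw [hidx]
    rfl
  · refine ⟨ch.toNat - 71, by omega, ?_⟩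
    have hj : ch.toNat - 71 < cnt.length := by omega
    have hidx : PySem.List.pyIdx? cnt.length ((ch.toNat : Int) - 97) = some (ch.toNat - 71) := by
      unfold PySem.List.pyIdx?
      rw [if_neg (by omega : ¬ (0:Int) ≤ (ch.toNat : Int) - 97),
          if_pos (by rw [h26]; push_cast; omega)]
      congr 1
      rw [h26]
      omega
    have hget : PySem.List.pyGet? cnt ((ch.toNat : Int) - 97)
        = some (pvG cnt (ch.toNat - 71)) := by
      unfold PySem.List.pyGet?
      rw [hidx, Option.bind_some, List.getElem?_eq_getElem hj]
      congr 1
      exact (List.getD_eq_getElem cnt 0 hj).symm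
    unfold pvCountStep
    rw [hget]
    unfold PySem.List.pySet?
    rw [hidx]
    rfl

theorem pv_count_fold : ∀ (l : List Char) (c0 : List Int), c0.length = 26 → (∀ x ∈ c0, 0 ≤ x) →
    (∀ ch ∈ l, 71 ≤ ch.toNat ∧ ch.toNat ≤ 122) →
    ∃ c, l.foldlM pvCountStep c0 = some c ∧ c.length = 26 ∧ (∀ x ∈ c, 0 ≤ x) ∧
      pvSk 26 c = pvSk 26 c0 + l.length := by
  intro l
  induction l with
  | nil => intro c0 h26 hn _; exact ⟨c0, by simp, h26, hn, by simp⟩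
  | cons ch l ih =>
    intro c0 h26 hn hl
    obtain ⟨j, hj, hstep⟩ := pv_countStep c0 ch h26 (hl ch (by simp))
    have hjc : j < c0.length := by omega
    have hnn := pvG_nonneg c0 hn j
    have h26' : (c0.set j (pvG c0 j + 1)).length = 26 := by simpa using h26
    have hn' : ∀ x ∈ c0.set j (pvG c0 j + 1), 0 ≤ x := by
      intro x hx
      rcases List.mem_or_eq_of_mem_set hx with hx' | rfl
      · exact hn x hx'
      · omega
    obtain ⟨c, hc, a1, a2, a3⟩ := ih _ h26' hn' (fun d hd => hl d (by simp [hd]))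
    refine ⟨c, ?_, a1, a2, ?_⟩
    · rw [List.foldlM_cons, hstep]
      simpa using hc
    · have := pvSk_set c0 (pvG c0 j + 1) 26 j hj hjc
      simp only [List.length_cons]
      omega

theorem pvSk_replicate : pvSk 26 (List.replicate 26 (0:Int)) = 0 := by decide

-- the value Python's max(cnt) computes, for a nonempty list
theorem pvK_spec (c : List Int) (hne : c ≠ []) :
    (PySem.List.max? c (fun x => x)).getD 0 ∈ c ∧
      ∀ y ∈ c, y ≤ (PySem.List.max? c (fun x => x)).getD 0 := by
  rcases hm : PySem.List.max? c (fun x => x) with _ | m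
  · exact absurd ((PySem.List.max?_eq_none_iff c _).mp hm) hne
  · refine ⟨by simpa using PySem.List.max?_mem hm, fun y hy => ?_⟩
    simpa using PySem.List.max?_isMax hm y hy

theorem pv_foldl_max_map : ∀ (t : List Int) (x : Int),
    (t.map (fun z => max (z - 2) 0)).foldl max (max (x - 2) 0) = max ((t.foldl max x) - 2) 0 := by
  intro t
  induction t with
  | nil => intro x; rfl
  | cons a t ih =>
    intro x
    simp only [List.map_cons, List.foldl_cons]
    rw [← ih (max x a)]
    congr 1
    omega

theorem pvK_M (c : List Int) (hne : c ≠ []) :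
    (PySem.List.max? (pvM c) (fun x => x)).getD 0
      = max ((PySem.List.max? c (fun x => x)).getD 0 - 2) 0 := by
  obtain ⟨x, t, rfl⟩ := List.exists_cons_of_ne_nil hne
  show (PySem.List.max? (max (x - 2) 0 :: t.map (fun z => max (z - 2) 0)) (fun y => y)).getD 0 = _
  rw [PySem.List.max?_id_cons, PySem.List.max?_id_cons]
  simpa using pv_foldl_max_map t x

theorem pv_levels_zero (c : List Int) (h26 : c.length = 26)
    (hz : ∀ j, j < 26 → pvG c j = 0) : pvLevels c = [] := by
  have hne : c ≠ [] := by intro h; rw [h] at h26; simp at h26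
  have hzero : ∀ y ∈ c, y = 0 := by
    intro y hy
    obtain ⟨j, hj, rfl⟩ := List.mem_iff_getElem.mp hy
    have h0 := hz j (by omega)
    unfold pvG at h0
    rwa [List.getD_eq_getElem c 0 hj] at h0
  have hK : (PySem.List.max? c (fun x => x)).getD 0 = 0 := hzero _ (pvK_spec c hne).1
  unfold pvLevels
  rw [hK, PySem.List.pyRange_one_eq_nil (by norm_num)]
  rfl

theorem pv_levels_split (c : List Int) (h26 : c.length = 26) (hn : ∀ x ∈ c, 0 ≤ x)
    (hpos : pvSk 26 c ≠ 0) :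
    pvLevels c = pvLevel c 1 ++ (pvLevel c 2).reverse ++ pvLevels (pvM c) := by
  have hne : c ≠ [] := by intro h; rw [h] at h26; simp at h26
  obtain ⟨hKmem, hKmax⟩ := pvK_spec c hne
  obtain ⟨j0, hj0, hp0⟩ := pvSk_ex_pos c 26 hpos
  have hj0len : j0 < c.length := by omega
  have hnn0 := pvG_nonneg c hn j0
  have hK1 : 1 ≤ (PySem.List.max? c (fun x => x)).getD 0 := by
    have h1 := hKmax _ (pvG_mem c j0 hj0len)
    omega
  have hbound : ∀ i, pvG c i ≤ (PySem.List.max? c (fun x => x)).getD 0 := by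
    intro i
    by_cases hi : i < c.length
    · exact hKmax _ (pvG_mem c i hi)
    · rw [pvG_oob c i (by omega)]; omega
  unfold pvLevels
  rw [pvK_M c hne]
  rw [PySem.List.foldl_append_eq_flatMap, PySem.List.foldl_append_eq_flatMap]
  simp only [List.nil_append]
  set K := (PySem.List.max? c (fun x => x)).getD 0 with hKdef
  by_cases hK2 : 2 ≤ K
  · have hmax2 : max (K - 2) 0 = K - 2 := by omega
    rw [hmax2]
    rw [PySem.List.pyRange_one_cons (by omega : (1:Int) < K + 1)]
    rw [PySem.List.pyRange_one_cons (by omega : (1:Int) + 1 < K + 1)]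
    rw [List.flatMap_cons, List.flatMap_cons]
    have hg1 : (if (1:Int) % 2 == 1 then pvLevel c 1 else (pvLevel c 1).reverse) = pvLevel c 1 := by
      norm_num
    have hg2 : (if ((1:Int) + 1) % 2 == 1 then pvLevel c (1 + 1) else (pvLevel c (1 + 1)).reverse)
        = (pvLevel c 2).reverse := by
      norm_num
    rw [hg1, hg2, List.append_assoc]
    congr 1
    congr 1
    -- tail: flatMap over pyRange 3 (K+1) for c = flatMap over pyRange 1 (K-2+1) for pvM c
    rw [PySem.List.pyRange_one (1 + 1 + 1) (K + 1), PySem.List.pyRange_one 1 (K - 2 + 1)]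
    have hNN : (K + 1 - (1 + 1 + 1)).toNat = (K - 2 + 1 - 1).toNat := by omega
    rw [hNN, List.flatMap_map, List.flatMap_map]
    congr 1
    funext k
    have hpar : ((1 + 1 + 1 + (k:Int)) % 2 == 1) = ((1 + (k:Int)) % 2 == 1) := by
      rw [show (1 + 1 + 1 + (k:Int)) % 2 = (1 + (k:Int)) % 2 from by omega]
    have hlev : pvLevel c (1 + 1 + 1 + (k:Int)) = pvLevel (pvM c) (1 + (k:Int)) := by
      unfold pvLevel
      apply List.filterMap_congr
      intro i _
      rw [pvM_pvG]
      have hk : (0:Int) ≤ (k:Int) := Int.natCast_nonneg k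
      exact if_congr (by omega) rfl rfl
    simp only [hpar, hlev]
  · have hKeq : K = 1 := by omega
    rw [hKeq]
    have hmax0 : max ((1:Int) - 2) 0 = 0 := by norm_num
    rw [hmax0]
    rw [show (PySem.List.pyRange 1 (1 + 1) : List Int) = [1] from PySem.List.pyRange_one_singleton 1]
    rw [show (PySem.List.pyRange 1 (0 + 1) : List Int) = [] from PySem.List.pyRange_one_eq_nil (by norm_num)]
    have hlev2 : pvLevel c 2 = [] := by
      unfold pvLevel
      apply List.filterMap_eq_nil_iff.mpr
      intro i _
      rw [if_neg (by have := hbound i; omega)]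
    rw [List.flatMap_cons, List.flatMap_nil, List.flatMap_nil, hlev2]
    norm_num

theorem pv_loop (fuel : Nat) : ∀ (ans : List Char) (c : List Int) (n : Nat),
    c.length = 26 → (∀ x ∈ c, 0 ≤ x) → pvSk 26 c ≤ fuel → n = ans.length + pvSk 26 c →
    pvWhile fuel (ans, c) n = ans ++ pvLevels c := by
  induction fuel with
  | zero =>
    intro ans c n h26 hn hf hn'
    have hz : ∀ j, j < 26 → pvG c j = 0 := by
      intro j hj
      have h1 := pvSk_bound c 26 j hj
      have h2 := pvG_nonneg c hn j
      omega
    rw [pv_levels_zero c h26 hz]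
    simp [pvWhile]
  | succ f ih =>
    intro ans c n h26 hn hf hn'
    by_cases hS : pvSk 26 c = 0
    · have hz : ∀ j, j < 26 → pvG c j = 0 := by
        intro j hj
        have h1 := pvSk_bound c 26 j hj
        have h2 := pvG_nonneg c hn j
        omega
      rw [pv_levels_zero c h26 hz]
      have : ¬ ans.length < n := by omega
      simp [pvWhile, this]
    · have hcond : ans.length < n := by omega
      have hL1 : 0 < (pvLevel c 1).length := by
        obtain ⟨j, hj, hp⟩ := pvSk_ex_pos c 26 hS
        have hnn := pvG_nonneg c hn j
        have hmem : Char.ofNat (j + 97) ∈ pvLevel c 1 := by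
          apply List.mem_filterMap.mpr
          exact ⟨j, List.mem_range.mpr hj, by rw [if_pos (by omega)]⟩
        exact List.length_pos_of_mem hmem
      have hsplit := pvSk_split c hn 26
      have hM26 : (pvM c).length = 26 := by simpa [pvM] using h26
      have hMn : ∀ x ∈ pvM c, 0 ≤ x := by
        intro x hx
        obtain ⟨y, _, rfl⟩ := List.mem_map.mp hx
        omega
      have hstep : pvWhile (f+1) (ans, c) n = pvWhile f (pvRound (ans, c)) n := by
        simp [pvWhile, hcond]
      have hs2 : pvSk 26 c = (pvLevel c 1).length + (pvLevel c 2).length + pvSk 26 (pvM c) := by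
        simpa [pvLevel] using hsplit
      have hlen : (ans ++ pvLevel c 1 ++ (pvLevel c 2).reverse).length
          = ans.length + (pvLevel c 1).length + (pvLevel c 2).length := by
        simp
        omega
      rw [hstep, pv_round_eq ans c h26 hn]
      rw [ih _ _ n hM26 hMn (by omega) (by rw [hlen]; omega)]
      rw [pv_levels_split c h26 hn hS]
      simp [List.append_assoc]

theorem pv_toList_length (s : String) : s.toList.length = s.length := by
  simp

-- ===== VERDICT (by name: the statement is the Claim_ definition above) =====
theorem sortString_spec : Claim_equal_sortString := by
  intro s hdom hpre
  unfold Spec_sortString sortString sortString_alt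
  obtain ⟨c, hc, h26, hn, hSk⟩ := pv_count_fold s.toList (List.replicate 26 0)
    (by simp) (by intro x hx; simp at hx; omega) (by intro ch hch; exact hpre ch hch)
  unfold pvCount
  rw [hc]
  show String.mk (pvWhile s.length ([], c) s.length) = String.mk (pvLevels c)
  rw [pv_loop s.length [] c s.length h26 hn
    (by rw [hSk, pvSk_replicate, pv_toList_length]; omega)
    (by rw [hSk, pvSk_replicate, pv_toList_length]; simp)]
  simp
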